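-- pv_equiv track=rewrite | github.com/postvakje/oeis-sequences | oeis-sequences/OEISsequences.py | A067872
-- ===== SOURCE A (Python) =====
-- def A067872(n):
--     y, x, n2 = n * (n + 2), 2 * n + 3, n ** 2
--     m, r = divmod(y, n2)
--     while r:
--         y += x
--         x += 2
--         m, r = divmod(y, n2)
--     return m
-- ===== SOURCE B (Python) =====
-- # B: instead of stepping k one by one, precompute the square roots of 1 mod |n|
-- # and scan only candidates k congruent to a root mod |n| (a necessary condition
-- # for n^2 | k^2 - 1), block by block in increasing order.
-- def A067872(n):
--     a = n if n > 0 else -n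
--     a2 = a * a
--     roots = [s for s in range(a) if (s * s) % a == 1 % a]
--     j = n // a
--     while True:
--         for s in roots:
--             k = j * a + s
--             if k > n and (k * k) % a2 == 1 % a2:
--                 return (k * k - 1) // a2
--         j += 1
-- ===== Notes on version B (the rewrite author's own statement) =====
-- stated objective: faster
-- what changed: Instead of stepping k one at a time with an incremental divmod, B precomputes the square roots of 1 mod |n| in one O(|n|) pass and then tests only candidates k congruent to such a root mod |n|, block by block in increasing order.
import Mathlib
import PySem

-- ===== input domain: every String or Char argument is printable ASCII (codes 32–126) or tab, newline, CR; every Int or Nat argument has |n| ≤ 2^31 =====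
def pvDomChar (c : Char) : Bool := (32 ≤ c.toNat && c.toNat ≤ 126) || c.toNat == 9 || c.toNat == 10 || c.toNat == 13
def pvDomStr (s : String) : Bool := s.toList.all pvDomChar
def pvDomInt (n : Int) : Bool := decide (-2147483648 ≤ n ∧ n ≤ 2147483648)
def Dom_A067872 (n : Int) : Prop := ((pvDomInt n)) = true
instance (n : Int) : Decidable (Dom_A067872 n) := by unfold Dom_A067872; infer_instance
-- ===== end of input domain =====

-- B replaces A's one-by-one incremental scan (y += x) by precomputing the square
-- roots of 1 mod |n| and scanning only candidates congruent to a root mod |n|,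
-- block by block; return values agree on every n ≠ 0 (A raises ZeroDivisionError at n = 0, as does B).

-- ===== PORT A =====
-- while r: y += x; x += 2; m, r = divmod(y, n2); return m.
-- Fuel (n*n).toNat + 2 strictly exceeds the number of iterations for every n ≠ 0
-- (proved below); the fuel-out branch returns the same divmod quotient and is never
-- reached on inputs satisfying Pre_.
def A067872loop (n2 : Int) : Nat → Int → Int → Int
  | 0, y, _ => PySem.Int.floordiv y n2
  | fuel+1, y, x =>
    if PySem.Int.mod y n2 = 0 then PySem.Int.floordiv y n2
    else A067872loop n2 fuel (y + x) (x + 2)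

def A067872 (n : Int) : Int :=
  A067872loop (n ^ 2) ((n * n).toNat + 2) (n * (n + 2)) (2 * n + 3)

-- ===== PORT B =====
-- inner `for s in roots: … return …` of Source B
def A067872blk (n a a2 : Int) (roots : List Int) (j : Int) : Option Int :=
  roots.findSome? (fun s =>
    let k := j * a + s
    if n < k ∧ PySem.Int.mod (k * k) a2 = PySem.Int.mod 1 a2
    then some (PySem.Int.floordiv (k * k - 1) a2) else none)

-- outer `while True: … j += 1` of Source B; fuel (n*n).toNat + 2 blocks suffice (proved below)
def A067872loopB (n a a2 : Int) (roots : List Int) : Nat → Int → Int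
  | 0, _ => 0
  | fuel+1, j =>
    match A067872blk n a a2 roots j with
    | some v => v
    | none => A067872loopB n a a2 roots fuel (j + 1)

def A067872_alt (n : Int) : Int :=
  let a := if 0 < n then n else -n
  let a2 := a * a
  let roots := (PySem.List.pyRange 0 a 1).filter
      (fun s => PySem.Int.mod (s * s) a == PySem.Int.mod 1 a)
  A067872loopB n a a2 roots ((n * n).toNat + 2) (PySem.Int.floordiv n a)

-- ===== PRECONDITION & SPEC =====
-- Pre_ excludes exactly n = 0, where A (divmod(y, 0)) and B (n // a with a = 0) raise ZeroDivisionError.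
def Pre_A067872 (n : Int) : Prop := n ≠ 0
instance (n : Int) : Decidable (Pre_A067872 n) := by unfold Pre_A067872; infer_instance
def pvWitness_A067872 : Int := (5)

def Spec_A067872 (n : Int) (out : Int) : Prop := out = A067872_alt n
instance (n : Int) (out : Int) : Decidable (Spec_A067872 n out) := by unfold Spec_A067872; infer_instance

-- ===== CLAIM (what is proved, stated in full; the proofs are below) =====
def Claim_equal_A067872 : Prop := ∀ (n : Int), Dom_A067872 n → Pre_A067872 n → Spec_A067872 n (A067872 n)

-- ===== LEMMAS AND PROOFS =====

-- reference scan: consecutive k, A's test and result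
def seekA (n2 : Int) : Nat → Int → Int
  | 0, k => PySem.Int.floordiv (k * k - 1) n2
  | fuel+1, k =>
    if PySem.Int.mod (k * k - 1) n2 = 0 then PySem.Int.floordiv (k * k - 1) n2
    else seekA n2 fuel (k + 1)

-- reference scan: consecutive k, B's guard, test and result
def seekB (n a2 : Int) : Nat → Int → Int
  | 0, _ => 0
  | fuel+1, k =>
    if n < k ∧ PySem.Int.mod (k * k) a2 = PySem.Int.mod 1 a2
    then PySem.Int.floordiv (k * k - 1) a2
    else seekB n a2 fuel (k + 1)

lemma A_loop_eq_seekA (n2 : Int) : ∀ (f : Nat) (k : Int),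
    A067872loop n2 f (k * k - 1) (2 * k + 1) = seekA n2 f k := by
  intro f
  induction f with
  | zero => intro k; rfl
  | succ f ih =>
    intro k
    show (if PySem.Int.mod (k * k - 1) n2 = 0 then _ else A067872loop n2 f (k * k - 1 + (2 * k + 1)) (2 * k + 1 + 2)) = _
    have h1 : k * k - 1 + (2 * k + 1) = (k + 1) * (k + 1) - 1 := by ring
    have h2 : 2 * k + 1 + 2 = 2 * (k + 1) + 1 := by ring
    rw [h1, h2, ih (k + 1)]
    rfl

lemma A_eq_seekA (n : Int) :
    A067872 n = seekA (n ^ 2) ((n * n).toNat + 2) (n + 1) := by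
  have h1 : n * (n + 2) = (n + 1) * (n + 1) - 1 := by ring
  have h2 : 2 * n + 3 = 2 * (n + 1) + 1 := by ring
  show A067872loop (n ^ 2) ((n * n).toNat + 2) (n * (n + 2)) (2 * n + 3) = _
  rw [h1, h2, A_loop_eq_seekA]

-- filter removal: a findSome? whose function is none on filtered-out elements
lemma findSome?_filter {α β : Type} (p : α → Bool) (f : α → Option β) :
    ∀ (l : List α), (∀ x ∈ l, p x = false → f x = none) →
    (l.filter p).findSome? f = l.findSome? f := by
  intro l
  induction l with
  | nil => intro _; rfl
  | cons x xs ih =>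
    intro h
    by_cases hy : p x = true
    · rw [List.filter_cons_of_pos hy, List.findSome?_cons, List.findSome?_cons]
      cases f x <;> simp [ih (fun y hy' => h y (List.mem_cons_of_mem _ hy'))]
    · have hx : p x = false := by simpa using hy
      rw [List.filter_cons_of_neg (by simp [hx]), List.findSome?_cons,
        h x (List.mem_cons_self) hx]
      exact ih (fun y hy' => h y (List.mem_cons_of_mem _ hy'))

-- running c consecutive steps of seekB equals a findSome? over the block [k, k+c)
lemma seekB_run (n a2 : Int) : ∀ (c f : Nat) (k : Int),
    seekB n a2 (c + f) k =
      match (List.range c).findSome? (fun (i : Nat) =>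
          if n < k + (i : Int) ∧
              PySem.Int.mod ((k + (i : Int)) * (k + (i : Int))) a2 = PySem.Int.mod 1 a2
          then some (PySem.Int.floordiv ((k + (i : Int)) * (k + (i : Int)) - 1) a2)
          else none) with
      | some v => v
      | none => seekB n a2 f (k + (c : Int)) := by
  intro c
  induction c with
  | zero => intro f k; simp
  | succ c ih =>
    intro f k
    rw [List.range_succ_eq_map, List.findSome?_cons, List.findSome?_map]
    have hfuel : c + 1 + f = (c + f) + 1 := by omega
    rw [hfuel]
    show (if n < k ∧ PySem.Int.mod (k * k) a2 = PySem.Int.mod 1 a2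
          then PySem.Int.floordiv (k * k - 1) a2
          else seekB n a2 (c + f) (k + 1)) = _
    have hcomp : (fun (i : Nat) =>
          if n < k + ((Nat.succ i : Nat) : Int) ∧
              PySem.Int.mod ((k + ((Nat.succ i : Nat) : Int)) * (k + ((Nat.succ i : Nat) : Int))) a2 = PySem.Int.mod 1 a2
          then some (PySem.Int.floordiv ((k + ((Nat.succ i : Nat) : Int)) * (k + ((Nat.succ i : Nat) : Int)) - 1) a2)
          else none)
        = (fun (i : Nat) =>
          if n < (k + 1) + (i : Int) ∧
              PySem.Int.mod (((k + 1) + (i : Int)) * ((k + 1) + (i : Int))) a2 = PySem.Int.mod 1 a2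
          then some (PySem.Int.floordiv (((k + 1) + (i : Int)) * ((k + 1) + (i : Int)) - 1) a2)
          else none) := by
      funext i
      have h : k + ((Nat.succ i : Nat) : Int) = (k + 1) + (i : Int) := by push_cast; ring
      rw [h]
    by_cases hk : n < k ∧ PySem.Int.mod (k * k) a2 = PySem.Int.mod 1 a2
    · rw [if_pos hk]
      have hk0 : n < k + ((0 : Nat) : Int) ∧
          PySem.Int.mod ((k + ((0 : Nat) : Int)) * (k + ((0 : Nat) : Int))) a2 = PySem.Int.mod 1 a2 := by
        simpa using hk
      rw [if_pos hk0]
      simp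
    · rw [if_neg hk]
      have hk0 : ¬ (n < k + ((0 : Nat) : Int) ∧
          PySem.Int.mod ((k + ((0 : Nat) : Int)) * (k + ((0 : Nat) : Int))) a2 = PySem.Int.mod 1 a2) := by
        simpa using hk
      rw [if_neg hk0]
      show _ = (match (List.range c).findSome? _ with
        | some v => v
        | none => seekB n a2 f (k + ((c + 1 : Nat) : Int)))
      rw [show (Function.comp (fun (i : Nat) =>
          if n < k + (i : Int) ∧
              PySem.Int.mod ((k + (i : Int)) * (k + (i : Int))) a2 = PySem.Int.mod 1 a2
          then some (PySem.Int.floordiv ((k + (i : Int)) * (k + (i : Int)) - 1) a2)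
          else none) Nat.succ) = _ from hcomp]
      rw [ih f (k + 1)]
      have hcc : k + 1 + (c : Int) = k + ((c + 1 : Nat) : Int) := by push_cast; ring
      rw [hcc]

-- congruence mod a descends from congruence mod a*a, and depends only on s = k mod a
lemma root_test_of_block (a a2 j s : Int) (ha : 0 < a) (ha2 : a2 = a * a)
    (h : PySem.Int.mod ((j * a + s) * (j * a + s)) a2 = PySem.Int.mod 1 a2) :
    PySem.Int.mod (s * s) a = PySem.Int.mod 1 a := by
  have ha2pos : 0 < a2 := ha2 ▸ mul_pos ha ha
  rw [PySem.Int.mod_eq_emod_of_pos ha2pos, PySem.Int.mod_eq_emod_of_pos ha2pos] at h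
  rw [PySem.Int.mod_eq_emod_of_pos ha, PySem.Int.mod_eq_emod_of_pos ha]
  have hdvd : a ∣ a2 := ⟨a, ha2⟩
  have h1 : (j * a + s) * (j * a + s) % a = 1 % a := by
    calc (j * a + s) * (j * a + s) % a
        = (j * a + s) * (j * a + s) % a2 % a := (Int.emod_emod_of_dvd _ hdvd).symm
      _ = 1 % a2 % a := by rw [h]
      _ = 1 % a := Int.emod_emod_of_dvd _ hdvd
  calc s * s % a = (s * s + a * (j * a * j + 2 * j * s)) % a := by
        rw [Int.add_mul_emod_self_left]
    _ = (j * a + s) * (j * a + s) % a := by ring_nf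
    _ = 1 % a := h1

-- the block scan of port B equals the consecutive scan seekB
lemma loopB_eq_seekB (n a a2 : Int) (ha : 0 < a) (ha2 : a2 = a * a) :
    ∀ (f : Nat) (j : Int),
    A067872loopB n a a2 ((PySem.List.pyRange 0 a 1).filter
        (fun s => PySem.Int.mod (s * s) a == PySem.Int.mod 1 a)) f j
      = seekB n a2 (f * a.toNat) (j * a) := by
  intro f
  induction f with
  | zero => intro j; simp [A067872loopB, seekB]
  | succ f ih =>
    intro j
    have hblk : A067872blk n a a2 ((PySem.List.pyRange 0 a 1).filter
        (fun s => PySem.Int.mod (s * s) a == PySem.Int.mod 1 a)) j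
        = (List.range a.toNat).findSome? (fun (i : Nat) =>
          if n < j * a + (i : Int) ∧
              PySem.Int.mod ((j * a + (i : Int)) * (j * a + (i : Int))) a2 = PySem.Int.mod 1 a2
          then some (PySem.Int.floordiv ((j * a + (i : Int)) * (j * a + (i : Int)) - 1) a2)
          else none) := by
      show ((PySem.List.pyRange 0 a 1).filter _).findSome? _ = _
      rw [findSome?_filter _ _ _ ?side]
      case side =>
        intro s _ hps
        have hne : ¬ (PySem.Int.mod (s * s) a = PySem.Int.mod 1 a) := by
          simpa using hps
        show (if n < j * a + s ∧ PySem.Int.mod ((j * a + s) * (j * a + s)) a2 = PySem.Int.mod 1 a2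
              then _ else none) = none
        rw [if_neg]
        rintro ⟨_, hmod⟩
        exact hne (root_test_of_block a a2 j s ha ha2 hmod)
      have hcast : a = ((a.toNat : Nat) : Int) := (Int.toNat_of_nonneg ha.le).symm
      rw [show PySem.List.pyRange 0 a 1 = PySem.List.pyRange 0 ((a.toNat : Nat) : Int) 1 by rw [← hcast]]
      rw [PySem.List.pyRange_zero_natCast, List.findSome?_map]
      rfl
    show (match A067872blk n a a2 _ j with
        | some v => v
        | none => A067872loopB n a a2 _ f (j + 1)) = _
    rw [hblk]
    have hfuel : (f + 1) * a.toNat = a.toNat + f * a.toNat := by ring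
    rw [hfuel, seekB_run n a2 a.toNat (f * a.toNat) (j * a)]
    have hnext : j * a + ((a.toNat : Nat) : Int) = (j + 1) * a := by
      rw [Int.toNat_of_nonneg ha.le]; ring
    rw [hnext, ← ih (j + 1)]

-- bridge: B's congruence test is A's divisibility test (positive modulus)
lemma test_bridge (a2 k : Int) (h : 0 < a2) :
    (PySem.Int.mod (k * k) a2 = PySem.Int.mod 1 a2) ↔ PySem.Int.mod (k * k - 1) a2 = 0 := by
  rw [PySem.Int.mod_eq_emod_of_pos h, PySem.Int.mod_eq_emod_of_pos h,
    PySem.Int.mod_eq_zero_iff_dvd]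
  constructor
  · intro he
    exact Int.ModEq.dvd (Int.ModEq.symm he)
  · intro hd
    exact (Int.modEq_iff_dvd.mpr (by simpa using hd)).symm

lemma seekA_correct (n2 : Int) : ∀ (f : Nat) (k m : Int),
    k ≤ m → (m - k).toNat < f →
    PySem.Int.mod (m * m - 1) n2 = 0 →
    (∀ j, k ≤ j → j < m → PySem.Int.mod (j * j - 1) n2 ≠ 0) →
    seekA n2 f k = PySem.Int.floordiv (m * m - 1) n2 := by
  intro f
  induction f with
  | zero => intro k m hkm hf _ _; omega
  | succ f ih =>
    intro k m hkm hf hQ hmin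
    show (if PySem.Int.mod (k * k - 1) n2 = 0 then _ else seekA n2 f (k + 1)) = _
    by_cases hk : PySem.Int.mod (k * k - 1) n2 = 0
    · have : k = m := by
        by_contra hne
        exact hmin k le_rfl (lt_of_le_of_ne hkm hne) hk
      rw [if_pos hk, this]
    · have hkm' : k < m := lt_of_le_of_ne hkm (by rintro rfl; exact hk hQ)
      rw [if_neg hk]
      exact ih (k + 1) m (by omega) (by omega) hQ
        (fun j h1 h2 => hmin j (by omega) h2)

lemma seekB_correct (n a2 : Int) (h2 : 0 < a2) : ∀ (f : Nat) (k m : Int),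
    k ≤ m → (m - k).toNat < f → n < m →
    PySem.Int.mod (m * m - 1) a2 = 0 →
    (∀ j, n < j → j < m → PySem.Int.mod (j * j - 1) a2 ≠ 0) →
    seekB n a2 f k = PySem.Int.floordiv (m * m - 1) a2 := by
  intro f
  induction f with
  | zero => intro k m hkm hf _ _ _; omega
  | succ f ih =>
    intro k m hkm hf hnm hQ hmin
    show (if n < k ∧ PySem.Int.mod (k * k) a2 = PySem.Int.mod 1 a2 then _ else seekB n a2 f (k + 1)) = _
    by_cases hk : n < k ∧ PySem.Int.mod (k * k) a2 = PySem.Int.mod 1 a2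
    · have hQk : PySem.Int.mod (k * k - 1) a2 = 0 := (test_bridge a2 k h2).mp hk.2
      have : k = m := by
        by_contra hne
        exact hmin k hk.1 (lt_of_le_of_ne hkm hne) hQk
      rw [if_pos hk, this]
    · have hkm' : k < m := by
        rcases eq_or_lt_of_le hkm with h | h
        · exfalso; exact hk (h ▸ ⟨hnm, (test_bridge a2 m h2).mpr hQ⟩)
        · exact h
      rw [if_neg hk]
      exact ih (k + 1) m (by omega) (by omega) hnm hQ hmin

-- ===== VERDICT (by name: the statement is the Claim_ definition above) =====
theorem A067872_spec : Claim_equal_A067872 := by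
  intro n _ hn
  have hn0 : n ≠ 0 := hn
  have hnn : (0 : Int) < n * n := by rcases lt_or_gt_of_ne hn0 with h | h <;> nlinarith
  have hsq : n ^ 2 = n * n := sq n
  have h2 : (0 : Int) < n ^ 2 := hsq ▸ hnn
  -- a witness index tw with the loop test true at n + 1 + tw, and tw ≤ n*n - 1
  obtain ⟨tw, hPtw, htwle⟩ : ∃ tw : Nat,
      PySem.Int.mod ((n + 1 + tw) * (n + 1 + tw) - 1) (n ^ 2) = 0 ∧ (tw : Int) ≤ n * n - 1 := by
    rcases lt_trichotomy n 0 with hneg | hz | hpos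
    · -- n ≤ -1 : k = -1 works ((-1)^2 - 1 = 0)
      refine ⟨(-n - 2).toNat, ?_, ?_⟩
      · rcases eq_or_lt_of_le (show n ≤ -1 by omega) with h1 | h1
        · -- n = -1 : modulus 1
          rw [PySem.Int.mod_eq_zero_iff_dvd, show n ^ 2 = 1 by rw [h1]; norm_num]
          exact one_dvd _
        · have hle : n ≤ -2 := by omega
          have : n + 1 + ((-n - 2).toNat : Int) = -1 := by
            rw [Int.toNat_of_nonneg (by omega)]; ring
          rw [this]
          norm_num [PySem.Int.mod_eq_zero_iff_dvd]
      · have : -n - 2 ≤ n * n - 1 := by nlinarith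
        omega
    · exact absurd hz hn0
    · -- n ≥ 1 : k = n^2 - 1 works, and for n = 1 the modulus is 1 so k = n + 1 works
      rcases eq_or_lt_of_le (show 1 ≤ n by omega) with h1 | h1
      · refine ⟨0, ?_, by rw [← h1]; norm_num⟩
        rw [PySem.Int.mod_eq_zero_iff_dvd, show n ^ 2 = 1 by rw [← h1]; norm_num]
        exact one_dvd _
      · have hge : 2 ≤ n := by omega
        refine ⟨(n * n - n - 2).toNat, ?_, ?_⟩
        · have : n + 1 + ((n * n - n - 2).toNat : Int) = n * n - 1 := by
            rw [Int.toNat_of_nonneg (by nlinarith)]; ring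
          rw [this, PySem.Int.mod_eq_zero_iff_dvd]
          exact ⟨n * n - 2, by rw [hsq]; ring⟩
        · have h0 : (0:Int) ≤ n * n - n - 2 := by nlinarith
          have : n * n - n - 2 ≤ n * n - 1 := by omega
          omega
  have hex : ∃ t : Nat, PySem.Int.mod ((n + 1 + t) * (n + 1 + t) - 1) (n ^ 2) = 0 := ⟨tw, hPtw⟩
  set t0 := Nat.find hex with ht0
  set m : Int := n + 1 + t0 with hm
  have hQm : PySem.Int.mod (m * m - 1) (n ^ 2) = 0 := Nat.find_spec hex
  have ht0tw : t0 ≤ tw := Nat.find_le hPtw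
  have ht0le : (t0 : Int) ≤ n * n - 1 := le_trans (by exact_mod_cast Nat.cast_le.mpr ht0tw) htwle
  have hnm : n < m := by simp only [hm]; omega
  have hmin : ∀ j : Int, n < j → j < m → PySem.Int.mod (j * j - 1) (n ^ 2) ≠ 0 := by
    intro j hnj hjm hQj
    have hj : j = n + 1 + ((j - (n + 1)).toNat : Int) := by
      rw [Int.toNat_of_nonneg (by omega)]; ring
    have hlt : (j - (n + 1)).toNat < t0 := by omega
    exact Nat.find_min hex hlt (by rw [← hj]; exact hQj)
  -- A's side: the incremental loop is the consecutive scan from n + 1, which hits m first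
  have hA : A067872 n = PySem.Int.floordiv (m * m - 1) (n ^ 2) := by
    rw [A_eq_seekA]
    exact seekA_correct (n ^ 2) _ (n + 1) m (by omega) (by omega) hQm
      (fun j h1 h2 => hmin j (by omega) h2)
  -- B's side
  set a : Int := if 0 < n then n else -n with hadef
  have ha : 0 < a := by
    simp only [hadef]; split
    · omega
    · omega
  have haa : a * a = n ^ 2 := by
    simp only [hadef]; split <;> rw [hsq] <;> ring
  set j0 : Int := PySem.Int.floordiv n a with hj0
  have hj0a : j0 * a ≤ n ∧ n - j0 * a < a := by
    have h0 := PySem.Int.floordiv_mul_add_mod n a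
    rw [← hj0] at h0
    have h1 := PySem.Int.mod_nonneg n ha
    have h3 := PySem.Int.mod_lt n ha
    constructor <;> omega
  have hB : A067872_alt n = seekB n (a * a) (((n * n).toNat + 2) * a.toNat) (j0 * a) := by
    have hloop := loopB_eq_seekB n a (a * a) ha rfl ((n * n).toNat + 2) j0
    calc A067872_alt n
        = A067872loopB n a (a * a)
            ((PySem.List.pyRange 0 a 1).filter
              (fun s => PySem.Int.mod (s * s) a == PySem.Int.mod 1 a))
            ((n * n).toNat + 2) (PySem.Int.floordiv n a) := by
          simp only [A067872_alt, hadef]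
      _ = _ := by rw [← hj0]; exact hloop
  have hfuelB : (m - j0 * a).toNat < ((n * n).toNat + 2) * a.toNat := by
    have hmul : n * n * 1 ≤ n * n * a := by
      have : (0:Int) ≤ n * n := hnn.le
      nlinarith
    have hkey : m - j0 * a < (n * n + 2) * a := by nlinarith [hj0a.1, hj0a.2, ht0le, ha]
    have hcast : ((((n * n).toNat + 2) * a.toNat : Nat) : Int) = (n * n + 2) * a := by
      push_cast [Int.toNat_of_nonneg hnn.le, Int.toNat_of_nonneg ha.le]
      ring
    omega
  have h2a : (0:Int) < a * a := mul_pos ha ha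
  have hQm' : PySem.Int.mod (m * m - 1) (a * a) = 0 := by rw [haa]; exact hQm
  have hmin' : ∀ j : Int, n < j → j < m → PySem.Int.mod (j * j - 1) (a * a) ≠ 0 := by
    intro j hx hy; rw [haa]; exact hmin j hx hy
  have hBval : A067872_alt n = PySem.Int.floordiv (m * m - 1) (a * a) :=
    hB.trans (seekB_correct n (a * a) h2a _ (j0 * a) m (by omega) hfuelB hnm hQm' hmin')
  show A067872 n = A067872_alt n
  rw [hA, hBval, haa]
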